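-- pv_equiv track=rewrite | github.com/slalit360/scalar_practice | DSA/Subsequence_subset/lexographic_min.py | lex_min_naive
-- ===== SOURCE A (Python) =====
-- def lex_min_naive(A):
--     # TC : O(n * 2^n)
--     def is_set(s, k):
--         return s & (1 << k)
--
--     n = len(A)
--     ans = "z" * n
--     for i in range(2 ** n):
--         m = ""
--         for j in range(n):
--             if is_set(i, j):
--                 m += A[j]
--         if len(m) >= 2:
--             ans = min(ans, m)
--     return ans
-- ===== SOURCE B (Python) =====
-- def lex_min_naive(A):
--     # Only minimal subsequences can win: a single element, or a pair (a subsequence's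
--     # concatenation is always >= the concatenation of one of its prefixes of length <= 2).
--     best = "z" * len(A)
--     rest = list(A)
--     while rest:
--         s = rest.pop(0)
--         if len(s) >= 2 and s < best:
--             best = s
--         for t in rest:
--             u = s + t
--             if len(u) >= 2 and u < best:
--                 best = u
--     return best
-- ===== Notes on version B (the rewrite author's own statement) =====
-- stated objective: faster
-- what changed: B drops A's enumeration of all 2^n index subsets: since every subsequence concatenation is >= one of its length-<=2 prefixes, B scans only single elements and ordered pairs, keeping the smallest admissible candidate.
import Mathlib
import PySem

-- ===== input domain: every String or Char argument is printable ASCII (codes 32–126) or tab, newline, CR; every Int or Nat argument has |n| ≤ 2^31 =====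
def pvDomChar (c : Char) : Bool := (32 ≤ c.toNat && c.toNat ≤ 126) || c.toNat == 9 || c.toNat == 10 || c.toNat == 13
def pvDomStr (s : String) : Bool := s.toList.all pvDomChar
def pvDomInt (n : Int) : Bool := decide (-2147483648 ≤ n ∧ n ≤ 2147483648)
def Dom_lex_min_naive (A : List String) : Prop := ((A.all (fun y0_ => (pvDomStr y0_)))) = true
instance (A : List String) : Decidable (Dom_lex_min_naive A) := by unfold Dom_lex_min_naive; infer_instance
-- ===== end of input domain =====

-- B replaces A's O(n·2^n) subset enumeration by scanning only single elements and ordered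
-- pairs (every subsequence concatenation is ≥ one of those prefixes), an O(n²) scan.

-- ===== PORT A =====
def lex_min_naive (A : List String) : String :=
  let n := A.length
  (List.range (2 ^ n)).foldl (fun ans i =>
    let m := (List.range n).foldl (fun m j =>
      if i &&& (1 <<< j) ≠ 0 then m ++ ((PySem.List.pyGet? A (j : Int)).getD "") else m) ""
    if 2 ≤ PySem.Str.len m then (if m < ans then m else ans) else ans)
    (String.ofList (List.replicate n 'z'))

-- ===== PORT B =====
-- port of Source B's while/pop(0) loop: structural recursion on the remaining list
def altGo (best : String) : List String → String
  | [] => best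
  | s :: rest =>
    let b1 := if 2 ≤ PySem.Str.len s ∧ s < best then s else best
    let b2 := rest.foldl (fun b t =>
      let u := s ++ t
      if 2 ≤ PySem.Str.len u ∧ u < b then u else b) b1
    altGo b2 rest

def lex_min_naive_alt (A : List String) : String :=
  altGo (String.ofList (List.replicate A.length 'z')) A

-- ===== PRECONDITION & SPEC =====
def Spec_lex_min_naive (A : List String) (out : String) : Prop := out = lex_min_naive_alt A
instance (A : List String) (out : String) : Decidable (Spec_lex_min_naive A out) := by unfold Spec_lex_min_naive; infer_instance

-- ===== CLAIM (what is proved, stated in full; the proofs are below) =====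
def Claim_equal_lex_min_naive : Prop := ∀ (A : List String), Dom_lex_min_naive A → Spec_lex_min_naive A (lex_min_naive A)

-- ===== LEMMAS AND PROOFS =====

-- the common "keep the smaller admissible candidate" step
def pvStep (acc m : String) : String := if 2 ≤ PySem.Str.len m ∧ m < acc then m else acc

-- the concatenation A's inner loop builds for mask i
def pvMask (A : List String) (i : Nat) : String :=
  (List.range A.length).foldl (fun m j =>
    if i &&& (1 <<< j) ≠ 0 then m ++ ((PySem.List.pyGet? A (j : Int)).getD "") else m) ""

-- B's candidate list: singletons and ordered pairs
def pvCands : List String → List String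
  | [] => []
  | s :: rest => s :: (rest.map (fun t => s ++ t) ++ pvCands rest)

-- ---- lexicographic order facts ----

theorem pvList_not_append_lt (l m : List Char) : ¬ (l ++ m < l) := by
  induction l with
  | nil =>
    intro h
    rw [List.nil_append] at h
    exact List.not_lex_nil ((List.lt_iff_lex_lt _ _).mp h)
  | cons c l ih =>
    intro h
    rw [List.cons_append, List.cons_lt_cons_iff] at h
    rcases h with h | ⟨_, h⟩
    · exact lt_irrefl _ h
    · exact ih h

theorem pvList_append_lt_iff (l m k : List Char) : l ++ m < l ++ k ↔ m < k := by
  induction l with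
  | nil => simp
  | cons c l ih => simp [ih]

theorem pvStr_le_append (s t : String) : s ≤ s ++ t := by
  rw [← not_lt]
  intro h
  rw [String.lt_iff_toList_lt, String.toList_append] at h
  exact pvList_not_append_lt _ _ h

theorem pvStr_append_le_append (s t u : String) (h : t ≤ u) : s ++ t ≤ s ++ u := by
  rw [← not_lt]
  intro hc
  rw [String.lt_iff_toList_lt, String.toList_append, String.toList_append,
    pvList_append_lt_iff, ← String.lt_iff_toList_lt] at hc
  exact absurd h (not_le.mpr hc)

-- ---- generic facts about folding pvStep ----

theorem pvStep_le (acc m : String) : pvStep acc m ≤ acc := by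
  unfold pvStep; split_ifs with h
  · exact le_of_lt h.2
  · exact le_rfl

theorem pvStep_le_self (acc m : String) (h : 2 ≤ PySem.Str.len m) : pvStep acc m ≤ m := by
  unfold pvStep; split_ifs with hc
  · exact le_rfl
  · exact le_of_not_gt fun hlt => hc ⟨h, hlt⟩

theorem pvFoldl_step_le (l : List String) (init : String) :
    l.foldl pvStep init ≤ init := by
  induction l generalizing init with
  | nil => exact le_rfl
  | cons x l ih => exact le_trans (ih (pvStep init x)) (pvStep_le init x)

theorem pvFoldl_step_le_mem (l : List String) (init m : String) (hm : m ∈ l)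
    (hlen : 2 ≤ PySem.Str.len m) : l.foldl pvStep init ≤ m := by
  induction l generalizing init with
  | nil => cases hm
  | cons x l ih =>
    rcases List.mem_cons.mp hm with rfl | hm'
    · exact le_trans (pvFoldl_step_le l (pvStep init m)) (pvStep_le_self init m hlen)
    · exact ih (pvStep init x) hm'

theorem pvFoldl_step_cases (l : List String) (init : String) :
    l.foldl pvStep init = init ∨
      (l.foldl pvStep init ∈ l ∧ 2 ≤ PySem.Str.len (l.foldl pvStep init)) := by
  induction l generalizing init with
  | nil => exact Or.inl rfl
  | cons x l ih =>
    rcases ih (pvStep init x) with h | ⟨hmem, hlen⟩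
    · rw [List.foldl_cons, h]
      unfold pvStep
      split_ifs with hc
      · exact Or.inr ⟨List.mem_cons_self, hc.1⟩
      · exact Or.inl rfl
    · exact Or.inr ⟨List.mem_cons_of_mem _ hmem, hlen⟩

-- ---- normal forms of the two ports ----

theorem pvTwo_le_len_iff (s : String) : 2 ≤ PySem.Str.len s ↔ 2 ≤ s.length := by
  rw [PySem.Str.len_eq, String.length_toList]
  exact_mod_cast Iff.rfl

theorem pvA_eq (A : List String) :
    lex_min_naive A = ((List.range (2 ^ A.length)).map (pvMask A)).foldl pvStep
      (String.ofList (List.replicate A.length 'z')) := by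
  unfold lex_min_naive
  rw [List.foldl_map]
  refine PySem.List.foldl_congr_mem _ _ _ _ (fun ans i _ => ?_)
  show (if 2 ≤ PySem.Str.len (pvMask A i) then (if pvMask A i < ans then pvMask A i else ans) else ans)
      = pvStep ans (pvMask A i)
  unfold pvStep
  split_ifs <;> tauto

theorem pvAlt_eq_aux (l : List String) (best : String) :
    altGo best l = (pvCands l).foldl pvStep best := by
  induction l generalizing best with
  | nil => rfl
  | cons s rest ih =>
    calc altGo best (s :: rest)
        = altGo (rest.foldl (fun b t => pvStep b (s ++ t)) (pvStep best s)) rest := rfl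
      _ = altGo ((rest.map (fun t => s ++ t)).foldl pvStep (pvStep best s)) rest := by
            rw [List.foldl_map]
      _ = (pvCands rest).foldl pvStep ((rest.map (fun t => s ++ t)).foldl pvStep (pvStep best s)) := ih _
      _ = (pvCands (s :: rest)).foldl pvStep best := by
            simp [pvCands, List.foldl_append]

theorem pvAlt_eq (A : List String) :
    lex_min_naive_alt A = (pvCands A).foldl pvStep (String.ofList (List.replicate A.length 'z')) := by
  unfold lex_min_naive_alt
  exact pvAlt_eq_aux A _

-- ---- structure of the mask concatenation ----

theorem pvBit_iff (i j : Nat) : (i &&& (1 <<< j) ≠ 0) ↔ i.testBit j := by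
  rw [Nat.one_shiftLeft, Nat.and_two_pow]
  cases h : i.testBit j <;> simp

theorem pvFoldl_append_out (l : List Nat) (c : Nat → Prop) [DecidablePred c]
    (f : Nat → String) (m0 : String) :
    l.foldl (fun m j => if c j then m ++ f j else m) m0
      = m0 ++ l.foldl (fun m j => if c j then m ++ f j else m) "" := by
  induction l generalizing m0 with
  | nil => rw [List.foldl_nil, List.foldl_nil, String.append_empty]
  | cons a l ih =>
    rw [List.foldl_cons, List.foldl_cons,
      ih (if c a then m0 ++ f a else m0), ih (if c a then "" ++ f a else "")]
    split_ifs
    · rw [String.empty_append, String.append_assoc]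
    · rw [String.empty_append]

theorem pvMask_cons (a : String) (A : List String) (i : Nat) :
    pvMask (a :: A) i = (if i % 2 = 1 then a else "") ++ pvMask A (i / 2) := by
  unfold pvMask
  rw [List.length_cons, List.range_succ_eq_map, List.foldl_cons, List.foldl_map]
  have h1 : (fun (m : String) (j : Nat) =>
      if i &&& (1 <<< Nat.succ j) ≠ 0 then m ++ ((PySem.List.pyGet? (a :: A) ((Nat.succ j : Nat) : Int)).getD "") else m)
      = (fun (m : String) (j : Nat) =>
      if (i / 2) &&& (1 <<< j) ≠ 0 then m ++ ((PySem.List.pyGet? A ((j : Nat) : Int)).getD "") else m) := by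
    funext m j
    have hb : (i &&& (1 <<< Nat.succ j) ≠ 0) = ((i / 2) &&& (1 <<< j) ≠ 0) := by
      rw [eq_iff_iff, pvBit_iff, pvBit_iff, Nat.succ_eq_add_one, Nat.testBit_add_one]
    have hg : (PySem.List.pyGet? (a :: A) ((Nat.succ j : Nat) : Int)).getD ""
        = (PySem.List.pyGet? A ((j : Nat) : Int)).getD "" := by
      rw [PySem.List.pyGet?_natCast, PySem.List.pyGet?_natCast, Nat.succ_eq_add_one,
        List.getElem?_cons_succ]
    simp only [hb, hg]
  rw [h1]
  have h0 : (if i &&& (1 <<< 0) ≠ 0 then ("" : String) ++ ((PySem.List.pyGet? (a :: A) ((0 : Nat) : Int)).getD "") else "")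
      = (if i % 2 = 1 then a else "") := by
    have : (i &&& (1 <<< 0) ≠ 0) = (i % 2 = 1) := by
      rw [eq_iff_iff, pvBit_iff, Nat.testBit_zero]
      simp
    simp only [this, PySem.List.pyGet?_natCast]
    split_ifs <;> simp
  rw [h0]
  by_cases hb : i % 2 = 1 <;> simp only [hb, if_true, if_false] <;>
    exact pvFoldl_append_out _ _ _ _

theorem pvMask_zero (A : List String) : pvMask A 0 = "" := by
  induction A with
  | nil => rfl
  | cons a A ih => rw [pvMask_cons]; simp [ih]

theorem pvMask_single (A : List String) : ∀ b ∈ A, ∃ i, i < 2 ^ A.length ∧ pvMask A i = b := by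
  induction A with
  | nil => intro b hb; cases hb
  | cons a A ih =>
    intro b hb
    rcases List.mem_cons.mp hb with rfl | hb'
    · refine ⟨1, ?_, ?_⟩
      · have := Nat.two_pow_pos A.length
        rw [List.length_cons, pow_succ]; omega
      · rw [pvMask_cons]; norm_num [pvMask_zero]
    · obtain ⟨i, hi, hM⟩ := ih b hb'
      refine ⟨2 * i, ?_, ?_⟩
      · rw [List.length_cons, pow_succ]; omega
      · rw [pvMask_cons]
        have h2 : 2 * i % 2 = 0 := by omega
        have h3 : 2 * i / 2 = i := by omega
        rw [h2, h3]; simp [hM]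

theorem pvCands_complete (A : List String) :
    ∀ c ∈ pvCands A, ∃ i, i < 2 ^ A.length ∧ pvMask A i = c := by
  induction A with
  | nil => intro c hc; cases hc
  | cons s rest ih =>
    intro c hc
    rw [pvCands, List.mem_cons, List.mem_append] at hc
    rcases hc with rfl | hc | hc
    · refine ⟨1, ?_, ?_⟩
      · have := Nat.two_pow_pos rest.length
        rw [List.length_cons, pow_succ]; omega
      · rw [pvMask_cons]; norm_num [pvMask_zero]
    · obtain ⟨b, hb, rfl⟩ := List.mem_map.mp hc
      obtain ⟨i, hi, hM⟩ := pvMask_single rest b hb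
      refine ⟨2 * i + 1, ?_, ?_⟩
      · rw [List.length_cons, pow_succ]; omega
      · rw [pvMask_cons]
        have h2 : (2 * i + 1) % 2 = 1 := by omega
        have h3 : (2 * i + 1) / 2 = i := by omega
        rw [h2, h3]; simp [hM]
    · obtain ⟨i, hi, hM⟩ := ih c hc
      refine ⟨2 * i, ?_, ?_⟩
      · rw [List.length_cons, pow_succ]; omega
      · rw [pvMask_cons]
        have h2 : 2 * i % 2 = 0 := by omega
        have h3 : 2 * i / 2 = i := by omega
        rw [h2, h3]; simp [hM]

-- the first nonempty chosen element is a prefix (hence ≤) of the mask concatenation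
theorem pvMask_first (A : List String) : ∀ i, pvMask A i ≠ "" →
    ∃ b ∈ A, b ≠ "" ∧ b ≤ pvMask A i := by
  induction A with
  | nil => intro i hi; exact absurd rfl hi
  | cons a A ih =>
    intro i hi
    rw [pvMask_cons] at hi ⊢
    by_cases hb : i % 2 = 1
    · by_cases ha : a = ""
      · rw [hb] at hi ⊢
        simp only [if_true, ha, String.empty_append] at hi ⊢
        obtain ⟨b, hbA, hb0, hble⟩ := ih (i / 2) hi
        exact ⟨b, List.mem_cons_of_mem _ hbA, hb0, hble⟩
      · refine ⟨a, List.mem_cons_self, ha, ?_⟩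
        rw [hb]; simp only [if_true]
        exact pvStr_le_append _ _
    · rw [if_neg hb, String.empty_append] at hi ⊢
      obtain ⟨b, hbA, hb0, hble⟩ := ih (i / 2) hi
      exact ⟨b, List.mem_cons_of_mem _ hbA, hb0, hble⟩

theorem pvLen_pos_of_ne (s : String) (h : s ≠ "") : 1 ≤ s.length := by
  by_contra hc
  exact h (String.length_eq_zero_iff.mp (by omega))

theorem pvCands_cover (A : List String) : ∀ i, 2 ≤ (pvMask A i).length →
    ∃ c ∈ pvCands A, 2 ≤ PySem.Str.len c ∧ c ≤ pvMask A i := by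
  induction A with
  | nil =>
    intro i hlen
    have : pvMask [] i = "" := rfl
    rw [this] at hlen
    simp at hlen
  | cons a A ih =>
    intro i hlen
    rw [pvMask_cons] at hlen ⊢
    by_cases hb : i % 2 = 1
    · rw [hb] at hlen ⊢
      simp only [if_true] at hlen ⊢
      by_cases ha : a = ""
      · rw [ha, String.empty_append] at hlen ⊢
        obtain ⟨c, hc, hclen, hcle⟩ := ih (i / 2) hlen
        exact ⟨c, by rw [pvCands]; exact List.mem_cons_of_mem _ (List.mem_append_right _ hc),
          hclen, hcle⟩
      · by_cases ha2 : 2 ≤ a.length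
        · exact ⟨a, by rw [pvCands]; exact List.mem_cons_self,
            (pvTwo_le_len_iff a).mpr ha2, pvStr_le_append _ _⟩
        · have ha1 : a.length = 1 := by
            have := pvLen_pos_of_ne a ha; omega
          have ht : pvMask A (i / 2) ≠ "" := by
            intro he
            rw [he, String.append_empty] at hlen
            omega
          obtain ⟨b, hbA, hb0, hble⟩ := pvMask_first A (i / 2) ht
          refine ⟨a ++ b, ?_, ?_, ?_⟩
          · rw [pvCands]
            exact List.mem_cons_of_mem _ (List.mem_append_left _
              (List.mem_map.mpr ⟨b, hbA, rfl⟩))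
          · rw [pvTwo_le_len_iff, String.length_append]
            have := pvLen_pos_of_ne b hb0
            omega
          · exact pvStr_append_le_append a b _ hble
    · rw [if_neg hb, String.empty_append] at hlen ⊢
      obtain ⟨c, hc, hclen, hcle⟩ := ih (i / 2) hlen
      exact ⟨c, by rw [pvCands]; exact List.mem_cons_of_mem _ (List.mem_append_right _ hc),
        hclen, hcle⟩

-- ===== VERDICT (by name: the statement is the Claim_ definition above) =====
theorem lex_min_naive_spec : Claim_equal_lex_min_naive := by
  intro A _
  unfold Spec_lex_min_naive
  rw [pvA_eq, pvAlt_eq]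
  apply le_antisymm
  · rcases pvFoldl_step_cases (pvCands A) (String.ofList (List.replicate A.length 'z')) with h | ⟨hmem, hlen⟩
    · rw [h]; exact pvFoldl_step_le _ _
    · obtain ⟨i, hi, hMi⟩ := pvCands_complete A _ hmem
      exact pvFoldl_step_le_mem _ _ _
        (List.mem_map.mpr ⟨i, List.mem_range.mpr hi, hMi⟩) hlen
  · rcases pvFoldl_step_cases ((List.range (2 ^ A.length)).map (pvMask A))
      (String.ofList (List.replicate A.length 'z')) with h | ⟨hmem, hlen⟩
    · rw [h]; exact pvFoldl_step_le _ _
    · obtain ⟨i, _, hMi⟩ := List.mem_map.mp hmem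
      obtain ⟨c, hcmem, hclen, hcle⟩ := pvCands_cover A i
        (by rw [hMi, ← pvTwo_le_len_iff]; exact hlen)
      exact le_trans (pvFoldl_step_le_mem _ _ _ hcmem hclen) (hMi ▸ hcle)
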